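-- pv_equiv track=rewrite | github.com/kimth007kim/python_algorithm | 코테스터디/1011/3주차_퍼즐 조각 채우기.py | bfs
-- ===== SOURCE A (Python) =====
-- from collections import deque
--
-- def bfs(x, y, game_board, visited, puzzle, number):
--     LENGTH = len(game_board)
--     dx = [0, 1, 0, -1]
--     dy = [1, 0, -1, 0]
--     storage = []
--     storage.append((x, y))
--     visited[x][y] = True
--     q = deque()
--     q.append([x, y])
--     while q:
--         x, y = q.popleft()
--         for i in range(4):
--             nx = dx[i] + x
--             ny = dy[i] + y
--             if 0 <= nx < LENGTH and 0 <= ny < LENGTH: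
--                 if game_board[nx][ny] == number and not visited[nx][ny]:
--                     visited[nx][ny] = True
--                     q.append([nx, ny])
--                     storage.append((nx, ny))
--     return sorted(storage)
-- ===== SOURCE B (Python) =====
-- def bfs(x, y, game_board, visited, puzzle, number):
--     # Recursive DFS flood fill instead of A's BFS queue: dfs marks its cell,
--     # records it, and recurses into each acceptable neighbour; the component
--     # is returned sorted, and visited ends in the same state as with A.
--     L = len(game_board)
--     storage = []
--
--     def dfs(cx, cy):
--         visited[cx][cy] = True
--         storage.append((cx, cy))
--         for dx, dy in ((0, 1), (1, 0), (0, -1), (-1, 0)):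
--             nx, ny = dx + cx, dy + cy
--             if 0 <= nx < L and 0 <= ny < L and game_board[nx][ny] == number \
--                     and not visited[nx][ny]:
--                 dfs(nx, ny)
--
--     dfs(x, y)
--     return sorted(storage)
-- ===== Notes on version B (the rewrite author's own statement) =====
-- stated objective: alternative
-- what changed: Replaces A's iterative BFS worklist (deque, popleft, while-loop) by a recursive depth-first flood fill: a nested dfs marks its cell, records it, and recurses into each acceptable neighbour, so the component is traversed depth-first with no queue at all; the sorted result and the final visited state are identical.
import Mathlib
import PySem

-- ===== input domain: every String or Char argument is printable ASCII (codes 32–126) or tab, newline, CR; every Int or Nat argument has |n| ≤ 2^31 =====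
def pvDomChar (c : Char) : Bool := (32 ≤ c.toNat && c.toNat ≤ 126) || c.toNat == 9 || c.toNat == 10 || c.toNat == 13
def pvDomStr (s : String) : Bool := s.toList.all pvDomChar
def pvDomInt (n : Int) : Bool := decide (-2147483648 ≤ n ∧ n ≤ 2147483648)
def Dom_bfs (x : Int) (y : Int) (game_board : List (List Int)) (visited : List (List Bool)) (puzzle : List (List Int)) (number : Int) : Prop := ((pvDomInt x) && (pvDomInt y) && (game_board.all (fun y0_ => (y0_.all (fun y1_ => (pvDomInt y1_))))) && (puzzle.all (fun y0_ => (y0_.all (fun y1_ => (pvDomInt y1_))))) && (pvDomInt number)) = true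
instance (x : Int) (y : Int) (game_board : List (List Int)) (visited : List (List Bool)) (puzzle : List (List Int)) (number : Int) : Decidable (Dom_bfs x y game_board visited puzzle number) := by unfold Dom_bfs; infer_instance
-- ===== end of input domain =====

-- B replaces A's iterative BFS worklist (deque + while-loop) by a recursive depth-first
-- flood fill (objective: alternative, same cost). A mutates `visited` in place; the
-- equivalence proved here is about the RETURN value only (the Python B performs the
-- same mutation of `visited`, reaching the same final state).

-- ===== shared low-level grid helpers (both Pythons index the same rows the same way) =====

/-- `0 <= n[0] < L and 0 <= n[1] < L` -/
def pvInb (L : Int) (n : Int × Int) : Bool :=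
  decide (0 ≤ n.1) && decide (n.1 < L) && decide (0 ≤ n.2) && decide (n.2 < L)

/-- `game_board[i][j]` (total form; exact under `Pre_bfs`, where the indices hit real entries). -/
def pvBoardAt (gb : List (List Int)) (n : Int × Int) : Int :=
  (gb.getD n.1.toNat []).getD n.2.toNat 0

/-- `visited[i][j]` (total form; default `true`, exact under `Pre_bfs`). -/
def pvVAt (v : List (List Bool)) (n : Int × Int) : Bool :=
  (v.getD n.1.toNat []).getD n.2.toNat true

/-- set one entry of a row to `True` (no-op out of range; exact under `Pre_bfs`). -/
def pvSetTrue : List Bool → Nat → List Bool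
  | [], _ => []
  | _ :: r, 0 => true :: r
  | b :: r, j + 1 => b :: pvSetTrue r j

def pvMarkRows : List (List Bool) → Nat → Nat → List (List Bool)
  | [], _, _ => []
  | r :: v, 0, j => pvSetTrue r j :: v
  | r :: v, i + 1, j => r :: pvMarkRows v i j

/-- `visited[n[0]][n[1]] = True` (search interior: indices are nonnegative there) -/
def pvMark (v : List (List Bool)) (n : Int × Int) : List (List Bool) :=
  pvMarkRows v n.1.toNat n.2.toNat

/-- Python index resolution (negative indices count from the end). -/
def pvPyIdx (len : Nat) (i : Int) : Nat := if i < 0 then (i + len).toNat else i.toNat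

/-- `visited[x][y] = True`, with Python's negative-index wraparound
    (exact under `Pre_bfs`, which keeps both indices in Python's accepted range). -/
def pvMarkStart (v : List (List Bool)) (x y : Int) : List (List Bool) :=
  pvMarkRows v (pvPyIdx v.length x)
    (pvPyIdx (v.getD (pvPyIdx v.length x) []).length y)

/-- the `(dx[i], dy[i])` pairs, in loop order (shared by both Pythons) -/
def pvDirs : List (Int × Int) := [(0, 1), (1, 0), (0, -1), (-1, 0)]

-- ===== PORT A (deque BFS, marking `visited` as it enqueues) =====

/-- termination/fuel measure aid: number of `false` entries of `visited`. -/
def pvFalse (v : List (List Bool)) : Nat := (v.map (fun r => r.count false)).sum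

theorem pvSetTrue_count_lt (r : List Bool) (j : Nat) (h : r.getD j true = false) :
    (pvSetTrue r j).count false < r.count false := by
  induction r generalizing j with
  | nil => simp at h
  | cons b t ih =>
    cases j with
    | zero => simp_all [pvSetTrue, List.count_cons]
    | succ j =>
      simp only [List.getD_cons_succ] at h
      simp only [pvSetTrue, List.count_cons]
      have := ih j h
      omega

theorem pvMark_false_lt (v : List (List Bool)) (n : Int × Int) (h : pvVAt v n = false) :
    pvFalse (pvMark v n) < pvFalse v := by
  unfold pvVAt at h
  unfold pvMark
  generalize n.1.toNat = i at *
  generalize n.2.toNat = j at *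
  induction v generalizing i with
  | nil => simp at h
  | cons r v ih =>
    cases i with
    | zero =>
      simp only [List.getD_cons_zero] at h
      simp only [pvMarkRows, pvFalse, List.map_cons, List.sum_cons]
      have := pvSetTrue_count_lt r j h
      omega
    | succ i =>
      simp only [List.getD_cons_succ] at h
      simp only [pvMarkRows, pvFalse, List.map_cons, List.sum_cons]
      have := ih i h
      simp only [pvFalse] at this
      omega

/-- the body of A's `for i in range(4)` sweep: threads `(visited, q, storage)` through
    the four neighbour checks, enqueueing and marking accepted cells. -/
def pvStepDirs (gb : List (List Int)) (L number : Int) :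
    List (Int × Int) → (Int × Int) →
      List (List Bool) × List (Int × Int) × List (Int × Int) →
      List (List Bool) × List (Int × Int) × List (Int × Int)
  | [], _, st => st
  | d :: ds, c, (v, q, s) =>
    let n := (d.1 + c.1, d.2 + c.2)
    if pvInb L n then
      if pvBoardAt gb n == number && !pvVAt v n then
        pvStepDirs gb L number ds c (pvMark v n, q ++ [n], s ++ [n])
      else
        pvStepDirs gb L number ds c (v, q, s)
    else
      pvStepDirs gb L number ds c (v, q, s)

theorem pvStepDirs_measure (gb : List (List Int)) (L number : Int) :
    ∀ (ds : List (Int × Int)) (c : Int × Int) (v : List (List Bool))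
      (q s : List (Int × Int)),
      5 * pvFalse (pvStepDirs gb L number ds c (v, q, s)).1 +
        (pvStepDirs gb L number ds c (v, q, s)).2.1.length ≤ 5 * pvFalse v + q.length := by
  intro ds
  induction ds with
  | nil => intro c v q s; simp [pvStepDirs]
  | cons d ds ih =>
    intro c v q s
    simp only [pvStepDirs]
    split
    · split
      · rename_i h1 h2
        have hv : pvVAt v (d.1 + c.1, d.2 + c.2) = false := by
          rcases Bool.and_eq_true_iff.mp h2 with ⟨-, h3⟩
          simpa using h3
        have hm := pvMark_false_lt v (d.1 + c.1, d.2 + c.2) hv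
        have := ih c (pvMark v (d.1 + c.1, d.2 + c.2)) (q ++ [(d.1 + c.1, d.2 + c.2)])
          (s ++ [(d.1 + c.1, d.2 + c.2)])
        simp only [List.length_append, List.length_cons, List.length_nil] at this ⊢
        omega
      · exact ih c v q s
    · exact ih c v q s

/-- A's `while q:` loop. -/
def pvLoopA (gb : List (List Int)) (L number : Int) :
    List (List Bool) → List (Int × Int) → List (Int × Int) → List (Int × Int)
  | _, [], s => s
  | v, c :: q, s =>
    let t := pvStepDirs gb L number pvDirs c (v, q, s)
    pvLoopA gb L number t.1 t.2.1 t.2.2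
  termination_by v q _ => 5 * pvFalse v + q.length
  decreasing_by
    have := pvStepDirs_measure gb L number pvDirs c v q s
    simp only [List.length_cons]
    omega

def bfs (x : Int) (y : Int) (game_board : List (List Int)) (visited : List (List Bool)) (puzzle : List (List Int)) (number : Int) : List (Int × Int) :=
  let LENGTH : Int := game_board.length
  let storage : List (Int × Int) := [(x, y)]
  let visited1 := pvMarkStart visited x y
  let q : List (Int × Int) := [(x, y)]
  PySem.List.sorted2 (pvLoopA game_board LENGTH number visited1 q storage) Prod.fst Prod.snd

-- ===== PORT B (recursive DFS flood fill; the fuel argument is only a totality device: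
-- every mutual-recursive `dfs` call consumes a `false` entry of `visited`, so the
-- initial fuel `pvFalse visited + 1` is never exhausted — proved in the lemmas below) =====

mutual
/-- `dfs(cx, cy)`: mark the cell, record it, then sweep the four directions. -/
def pvDfsF (gb : List (List Int)) (L number : Int) :
    Nat → List (List Bool) → List (Int × Int) → (Int × Int) →
      List (List Bool) × List (Int × Int)
  | 0, v, s, _ => (v, s)
  | fuel + 1, v, s, c =>
      pvDfsDirsF gb L number fuel pvDirs (pvMarkStart v c.1 c.2) (s ++ [c]) c
  termination_by fuel _ _ _ => (fuel, 0)

/-- the `for dx, dy in …` loop of `dfs`: recurse into each acceptable neighbour. -/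
def pvDfsDirsF (gb : List (List Int)) (L number : Int) :
    Nat → List (Int × Int) → List (List Bool) → List (Int × Int) → (Int × Int) →
      List (List Bool) × List (Int × Int)
  | _, [], v, s, _ => (v, s)
  | fuel, d :: ds, v, s, c =>
      let n : Int × Int := (d.1 + c.1, d.2 + c.2)
      if pvInb L n && (pvBoardAt gb n == number) && !pvVAt v n then
        let t := pvDfsF gb L number fuel v s n
        pvDfsDirsF gb L number fuel ds t.1 t.2 c
      else
        pvDfsDirsF gb L number fuel ds v s c
  termination_by fuel ds _ _ _ => (fuel, ds.length + 1)
end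

def bfs_alt (x : Int) (y : Int) (game_board : List (List Int)) (visited : List (List Bool)) (puzzle : List (List Int)) (number : Int) : List (Int × Int) :=
  let L : Int := game_board.length
  let t := pvDfsF game_board L number (pvFalse visited + 1) visited [] (x, y)
  PySem.List.sorted2 t.2 Prod.fst Prod.snd

-- ===== PRECONDITION & SPEC =====

/-- a window cell that holds `number` (its in-window neighbours can be read by the search). -/
def pvNumCell (game_board : List (List Int)) (number : Int) (i j : Int) : Prop :=
  0 ≤ i ∧ i < game_board.length ∧ 0 ≤ j ∧ j < game_board.length ∧
  j.toNat < (game_board.getD i.toNat []).length ∧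
  (game_board.getD i.toNat []).getD j.toNat 0 = number

-- Pre_ excludes exactly the raising corners: a start index outside even Python's
-- negative-wraparound range, and inputs whose L×L search window is missing a board or
-- visited entry next to the start or next to a `number`-valued cell — the only cells a
-- run can ever read; whether such a missing entry is actually reached depends on the run
-- itself, so this closed-form shape condition is conservative and excludes a few inputs
-- on which A happens to return.
def Pre_bfs (x : Int) (y : Int) (game_board : List (List Int)) (visited : List (List Bool)) (puzzle : List (List Int)) (number : Int) : Prop :=
  (-(visited.length : Int) ≤ x ∧ x < (visited.length : Int)) ∧
  (-(((visited.getD (pvPyIdx visited.length x) []).length : Int)) ≤ y ∧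
    y < (((visited.getD (pvPyIdx visited.length x) []).length : Int))) ∧
  (∀ i ∈ List.range game_board.length, ∀ j ∈ List.range game_board.length,
    ((x - (i : Int)).natAbs + (y - (j : Int)).natAbs = 1 ∨
      ∃ d ∈ pvDirs, pvNumCell game_board number ((i : Int) + d.1) ((j : Int) + d.2)) →
    (j < (game_board.getD i []).length ∧
     i < visited.length ∧ j < (visited.getD i []).length))

instance (x : Int) (y : Int) (game_board : List (List Int)) (visited : List (List Bool)) (puzzle : List (List Int)) (number : Int) : Decidable (Pre_bfs x y game_board visited puzzle number) := by unfold Pre_bfs pvNumCell; infer_instance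

def pvWitness_bfs : Int × Int × List (List Int) × List (List Bool) × List (List Int) × Int :=
  (0, 0, [[1, 1], [0, 1]], [[false, false], [false, false]], [], 1)

def Spec_bfs (x : Int) (y : Int) (game_board : List (List Int)) (visited : List (List Bool)) (puzzle : List (List Int)) (number : Int) (out : List (Int × Int)) : Prop := out = bfs_alt x y game_board visited puzzle number
instance (x : Int) (y : Int) (game_board : List (List Int)) (visited : List (List Bool)) (puzzle : List (List Int)) (number : Int) (out : List (Int × Int)) : Decidable (Spec_bfs x y game_board visited puzzle number out) := by unfold Spec_bfs; infer_instance

-- ===== CLAIM (what is proved, stated in full; the proofs are below) =====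
def Claim_equal_bfs : Prop := ∀ (x : Int) (y : Int) (game_board : List (List Int)) (visited : List (List Bool)) (puzzle : List (List Int)) (number : Int), Dom_bfs x y game_board visited puzzle number → Pre_bfs x y game_board visited puzzle number → Spec_bfs x y game_board visited puzzle number (bfs x y game_board visited puzzle number)

-- ===== LEMMAS AND PROOFS =====

-- == neighbours ==

/-- the four neighbours of a cell, in loop order. -/
def pvNbrs (c : Int × Int) : List (Int × Int) := pvDirs.map (fun d => (d.1 + c.1, d.2 + c.2))

theorem pvNbrs_nodup (c : Int × Int) : (pvNbrs c).Nodup := by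
  simp [pvNbrs, pvDirs, Prod.ext_iff]

/-- B's acceptance test = A's acceptance test, as one predicate. -/
def pvGood (gb : List (List Int)) (L number : Int) (v : List (List Bool)) (n : Int × Int) : Bool :=
  pvInb L n && (pvBoardAt gb n == number) && !pvVAt v n

-- == pointwise facts about marking ==

theorem pvSetTrue_getD_self (r : List Bool) (j : Nat) : (pvSetTrue r j).getD j true = true := by
  induction r generalizing j with
  | nil => simp [pvSetTrue]
  | cons b t ih =>
    cases j with
    | zero => simp [pvSetTrue]
    | succ j => simpa [pvSetTrue] using ih j

theorem pvSetTrue_getD_ne (r : List Bool) (j j' : Nat) (h : j' ≠ j) :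
    (pvSetTrue r j).getD j' true = r.getD j' true := by
  induction r generalizing j j' with
  | nil => simp [pvSetTrue]
  | cons b t ih =>
    cases j with
    | zero =>
      cases j' with
      | zero => omega
      | succ j' => simp [pvSetTrue]
    | succ j =>
      cases j' with
      | zero => simp [pvSetTrue]
      | succ j' => simpa [pvSetTrue] using ih j j' (by omega)

theorem pvGetN_mark_self (v : List (List Bool)) (i j : Nat) :
    ((pvMarkRows v i j).getD i []).getD j true = true := by
  induction v generalizing i with
  | nil => simp [pvMarkRows]
  | cons r v ih =>
    cases i with
    | zero =>
      simp only [pvMarkRows, List.getD_cons_zero]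
      exact pvSetTrue_getD_self r j
    | succ i => simpa [pvMarkRows] using ih i

theorem pvVAt_mark_self (v : List (List Bool)) (n : Int × Int) :
    pvVAt (pvMark v n) n = true := pvGetN_mark_self v n.1.toNat n.2.toNat

theorem pvGetN_mark_ne (v : List (List Bool)) (i j i' j' : Nat)
    (h : i' ≠ i ∨ j' ≠ j) :
    ((pvMarkRows v i j).getD i' []).getD j' true = (v.getD i' []).getD j' true := by
  induction v generalizing i i' with
  | nil => simp [pvMarkRows]
  | cons r v ih =>
    cases i with
    | zero =>
      cases i' with
      | zero =>
        have hj : j' ≠ j := by omega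
        simp only [pvMarkRows, List.getD_cons_zero]
        exact pvSetTrue_getD_ne r j j' hj
      | succ i' => simp [pvMarkRows]
    | succ i =>
      cases i' with
      | zero => simp [pvMarkRows]
      | succ i' => simpa [pvMarkRows] using ih i i' (by omega)

theorem pvVAt_mark_ne (v : List (List Bool)) (n m : Int × Int)
    (h : m.1.toNat ≠ n.1.toNat ∨ m.2.toNat ≠ n.2.toNat) :
    pvVAt (pvMark v n) m = pvVAt v m := pvGetN_mark_ne v n.1.toNat n.2.toNat m.1.toNat m.2.toNat h

-- == pvFalse only ever shrinks under marking ==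

theorem pvSetTrue_count_le (r : List Bool) (j : Nat) :
    (pvSetTrue r j).count false ≤ r.count false := by
  induction r generalizing j with
  | nil => simp [pvSetTrue]
  | cons b t ih =>
    cases j with
    | zero => cases b <;> simp [pvSetTrue, List.count_cons]
    | succ j =>
      simp only [pvSetTrue, List.count_cons]
      have := ih j
      omega

theorem pvFalse_markRows_le (v : List (List Bool)) (i j : Nat) :
    pvFalse (pvMarkRows v i j) ≤ pvFalse v := by
  induction v generalizing i with
  | nil => simp [pvMarkRows]
  | cons r v ih =>
    cases i with
    | zero =>
      simp only [pvMarkRows, pvFalse, List.map_cons, List.sum_cons]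
      have := pvSetTrue_count_le r j
      omega
    | succ i =>
      simp only [pvMarkRows, pvFalse, List.map_cons, List.sum_cons]
      have := ih i
      simp only [pvFalse] at this
      omega

theorem pvFalse_markStart_le (v : List (List Bool)) (x y : Int) :
    pvFalse (pvMarkStart v x y) ≤ pvFalse v := pvFalse_markRows_le v _ _

-- == marking a list of cells ==

def pvMarkAll (v : List (List Bool)) (N : List (Int × Int)) : List (List Bool) :=
  N.foldl pvMark v

theorem pvMarkAll_append (v : List (List Bool)) (N M : List (Int × Int)) :
    pvMarkAll v (N ++ M) = pvMarkAll (pvMarkAll v N) M := List.foldl_append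

theorem pvFalse_markAll_le (N : List (Int × Int)) :
    ∀ v : List (List Bool), pvFalse (pvMarkAll v N) ≤ pvFalse v := by
  induction N with
  | nil => intro v; simp [pvMarkAll]
  | cons n N ih =>
    intro v
    calc pvFalse (pvMarkAll (pvMark v n) N) ≤ pvFalse (pvMark v n) := ih _
      _ ≤ pvFalse v := pvFalse_markRows_le v _ _

theorem pvVAt_markAll (N : List (Int × Int)) :
    ∀ (v : List (List Bool)) (m : Int × Int),
      (∀ p ∈ N, 0 ≤ p.1 ∧ 0 ≤ p.2) → 0 ≤ m.1 → 0 ≤ m.2 →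
      pvVAt (pvMarkAll v N) m = (pvVAt v m || decide (m ∈ N)) := by
  induction N with
  | nil => intro v m _ _ _; simp [pvMarkAll]
  | cons p N ih =>
    intro v m hN hm1 hm2
    have hp := hN p (List.mem_cons_self)
    have hstep : pvVAt (pvMarkAll v (p :: N)) m = (pvVAt (pvMark v p) m || decide (m ∈ N)) :=
      ih (pvMark v p) m (fun q hq => hN q (List.mem_cons_of_mem p hq)) hm1 hm2
    by_cases he : m = p
    · subst he
      rw [hstep]
      simp [pvVAt_mark_self]
    · have ht : m.1.toNat ≠ p.1.toNat ∨ m.2.toNat ≠ p.2.toNat := by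
        rcases (not_and_or.mp (fun hc => he (Prod.ext_iff.mpr hc))) with h1 | h2
        · left; omega
        · right; omega
      rw [hstep, pvVAt_mark_ne v p m ht]
      simp [List.mem_cons, he]

-- == good cells and marking ==

theorem pvGood_nonneg {gb : List (List Int)} {L number : Int} {v : List (List Bool)}
    {n : Int × Int} (h : pvGood gb L number v n = true) :
    (0 ≤ n.1 ∧ n.1 < L) ∧ (0 ≤ n.2 ∧ n.2 < L) := by
  simp only [pvGood, pvInb, Bool.and_eq_true, decide_eq_true_eq] at h
  exact ⟨⟨h.1.1.1.1.1, h.1.1.1.1.2⟩, ⟨h.1.1.1.2, h.1.1.2⟩⟩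

theorem pvGood_markAll (gb : List (List Int)) (L number : Int) (v : List (List Bool))
    (N : List (Int × Int)) (hN : ∀ p ∈ N, pvGood gb L number v p = true) (m : Int × Int) :
    pvGood gb L number (pvMarkAll v N) m = true ↔
      (pvGood gb L number v m = true ∧ m ∉ N) := by
  by_cases hi : pvInb L m = true
  · have hm : (0 ≤ m.1 ∧ m.1 < L) ∧ (0 ≤ m.2 ∧ m.2 < L) := by
      simp only [pvInb, Bool.and_eq_true, decide_eq_true_eq] at hi
      exact ⟨⟨hi.1.1.1, hi.1.1.2⟩, ⟨hi.1.2, hi.2⟩⟩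
    have hNn : ∀ p ∈ N, 0 ≤ p.1 ∧ 0 ≤ p.2 := fun p hp =>
      ⟨(pvGood_nonneg (hN p hp)).1.1, (pvGood_nonneg (hN p hp)).2.1⟩
    rw [pvGood, pvGood, pvVAt_markAll N v m hNn hm.1.1 hm.2.1]
    simp only [hi, Bool.true_and, Bool.and_eq_true, Bool.not_eq_eq_eq_not, Bool.not_true,
      Bool.or_eq_false_iff, decide_eq_false_iff_not]
    tauto
  · rw [pvGood, pvGood]
    simp only [Bool.not_eq_true] at hi
    simp [hi]

/-- marking more cells can only destroy goodness, never create it. -/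
theorem pvGood_markAll_imp (gb : List (List Int)) (L number : Int) (w : List (List Bool))
    (X : List (Int × Int)) (hX : ∀ p ∈ X, 0 ≤ p.1 ∧ 0 ≤ p.2) (m : Int × Int)
    (h : pvGood gb L number (pvMarkAll w X) m = true) : pvGood gb L number w m = true := by
  have hm := pvGood_nonneg h
  have hV := pvVAt_markAll X w m hX hm.1.1 hm.2.1
  simp only [pvGood, Bool.and_eq_true, Bool.not_eq_eq_eq_not, Bool.not_true] at h ⊢
  rw [hV] at h
  rcases h with ⟨⟨h1, h2⟩, h3⟩
  exact ⟨⟨h1, h2⟩, by simpa using (Bool.or_eq_false_iff.mp h3).1⟩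

/-- a cell still acceptable after marking `X` cannot be one of the marked `X`. -/
theorem pvGood_markAll_not_mem (gb : List (List Int)) (L number : Int) (w : List (List Bool))
    (X : List (Int × Int)) (hX : ∀ p ∈ X, 0 ≤ p.1 ∧ 0 ≤ p.2) (m : Int × Int)
    (h : pvGood gb L number (pvMarkAll w X) m = true) : m ∉ X := by
  have hm := pvGood_nonneg h
  have hV := pvVAt_markAll X w m hX hm.1.1 hm.2.1
  simp only [pvGood, Bool.and_eq_true, Bool.not_eq_eq_eq_not, Bool.not_true] at h
  rw [hV] at h
  have := (Bool.or_eq_false_iff.mp h.2).2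
  simpa using this

-- == reachability through acceptable cells ==

inductive pvReach (P : Int × Int → Prop) : Int × Int → Int × Int → Prop
  | base {c d} : d ∈ pvNbrs c → P d → pvReach P c d
  | step {c d e} : pvReach P c d → e ∈ pvNbrs d → P e → pvReach P c e

theorem pvReach_mono {P Q : Int × Int → Prop} (h : ∀ m, P m → Q m) {c n : Int × Int}
    (hr : pvReach P c n) : pvReach Q c n := by
  induction hr with
  | base ha hp => exact .base ha (h _ hp)
  | step h1 ha hp ih => exact .step ih ha (h _ hp)

theorem pvReach_trans {P : Int × Int → Prop} {c d n : Int × Int}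
    (h1 : pvReach P c d) (h2 : pvReach P d n) : pvReach P c n := by
  induction h2 with
  | base ha hp => exact .step h1 ha hp
  | step hh ha hp ih => exact .step ih ha hp

-- == characterisation of A's direction sweep ==

theorem pvGood_mark_ne (gb : List (List Int)) (L number : Int) (v : List (List Bool))
    (n m : Int × Int) (hm : m ≠ n) (hn0 : 0 ≤ n.1 ∧ 0 ≤ n.2) :
    pvGood gb L number (pvMark v n) m = pvGood gb L number v m := by
  by_cases hi : pvInb L m = true
  · have hm0 : 0 ≤ m.1 ∧ 0 ≤ m.2 := by
      simp only [pvInb, Bool.and_eq_true, decide_eq_true_eq] at hi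
      exact ⟨hi.1.1.1, hi.1.2⟩
    have ht : m.1.toNat ≠ n.1.toNat ∨ m.2.toNat ≠ n.2.toNat := by
      rcases (not_and_or.mp (fun hc => hm (Prod.ext_iff.mpr hc))) with h1 | h2
      · left; omega
      · right; omega
    rw [pvGood, pvGood, pvVAt_mark_ne v n m ht]
  · simp only [Bool.not_eq_true] at hi
    rw [pvGood, pvGood]
    simp [hi]

theorem pvStepDirs_spec (gb : List (List Int)) (L number : Int) (c : Int × Int) :
    ∀ (ds : List (Int × Int)) (v : List (List Bool)) (q s : List (Int × Int)),
      (ds.map (fun d => (d.1 + c.1, d.2 + c.2))).Nodup →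
      pvStepDirs gb L number ds c (v, q, s) =
        (pvMarkAll v ((ds.map (fun d => (d.1 + c.1, d.2 + c.2))).filter (pvGood gb L number v)),
         q ++ (ds.map (fun d => (d.1 + c.1, d.2 + c.2))).filter (pvGood gb L number v),
         s ++ (ds.map (fun d => (d.1 + c.1, d.2 + c.2))).filter (pvGood gb L number v)) := by
  intro ds
  induction ds with
  | nil => intro v q s _; simp [pvStepDirs, pvMarkAll]
  | cons d ds ih =>
    intro v q s hnd
    simp only [List.map_cons, List.nodup_cons] at hnd
    obtain ⟨hn, hnd⟩ := hnd
    simp only [pvStepDirs, List.map_cons, List.filter_cons]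
    by_cases h1 : pvInb L (d.1 + c.1, d.2 + c.2) = true
    · by_cases h2 : (pvBoardAt gb (d.1 + c.1, d.2 + c.2) == number &&
          !pvVAt v (d.1 + c.1, d.2 + c.2)) = true
      · have hg : pvGood gb L number v (d.1 + c.1, d.2 + c.2) = true := by
          simp only [pvGood, Bool.and_eq_true] at *
          exact ⟨⟨h1, h2.1⟩, h2.2⟩
        rw [if_pos h1, if_pos h2, ih (pvMark v (d.1 + c.1, d.2 + c.2)) (q ++ [(d.1 + c.1, d.2 + c.2)]) (s ++ [(d.1 + c.1, d.2 + c.2)]) hnd]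
        have hfc : (ds.map (fun d => (d.1 + c.1, d.2 + c.2))).filter
              (pvGood gb L number (pvMark v (d.1 + c.1, d.2 + c.2))) =
            (ds.map (fun d => (d.1 + c.1, d.2 + c.2))).filter (pvGood gb L number v) := by
          apply List.filter_congr
          intro m hm
          exact pvGood_mark_ne gb L number v (d.1 + c.1, d.2 + c.2) m
            (fun he => hn (he ▸ hm)) ⟨(pvGood_nonneg hg).1.1, (pvGood_nonneg hg).2.1⟩
        rw [hfc, hg]
        simp [pvMarkAll]
      · have hg : pvGood gb L number v (d.1 + c.1, d.2 + c.2) = false := by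
          simp only [pvGood]
          simp only [Bool.not_eq_true] at h2
          simp [h2, Bool.and_assoc]
        rw [if_pos h1, if_neg (by simp [h2]), ih v q s hnd, hg]
        simp
    · have hg : pvGood gb L number v (d.1 + c.1, d.2 + c.2) = false := by
        simp only [pvGood]
        simp only [Bool.not_eq_true] at h1
        simp [h1]
      rw [if_neg h1, ih v q s hnd, hg]
      simp

-- == the worklist exchange argument for A ==

theorem pvKeyA (gb : List (List Int)) (L number : Int) (v : List (List Bool))
    (q : List (Int × Int)) (c : Int × Int) (n : Int × Int) :
    (n ∈ (pvNbrs c).filter (pvGood gb L number v) ∨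
      ∃ a ∈ q ++ (pvNbrs c).filter (pvGood gb L number v),
        pvReach (fun m => pvGood gb L number
          (pvMarkAll v ((pvNbrs c).filter (pvGood gb L number v))) m = true) a n) ↔
    (∃ a ∈ c :: q, pvReach (fun m => pvGood gb L number v m = true) a n) := by
  set N := (pvNbrs c).filter (pvGood gb L number v) with hNdef
  have hNgood : ∀ p ∈ N, pvGood gb L number v p = true := fun p hp => List.of_mem_filter hp
  have hGm : ∀ m, (pvGood gb L number (pvMarkAll v N) m = true) ↔
      (pvGood gb L number v m = true ∧ m ∉ N) := pvGood_markAll gb L number v N hNgood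
  constructor
  · rintro (hn | ⟨a, ha, hr⟩)
    · exact ⟨c, List.mem_cons_self, .base (List.mem_of_mem_filter hn) (List.of_mem_filter hn)⟩
    · have hr' : pvReach (fun m => pvGood gb L number v m = true) a n :=
        pvReach_mono (fun m hm => ((hGm m).mp hm).1) hr
      rcases List.mem_append.mp ha with haq | haN
      · exact ⟨a, List.mem_cons_of_mem c haq, hr'⟩
      · exact ⟨c, List.mem_cons_self,
          pvReach_trans (.base (List.mem_of_mem_filter haN) (List.of_mem_filter haN)) hr'⟩
  · rintro ⟨a, ha, hr⟩
    induction hr with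
    | @base d hadj hp =>
      by_cases hd : d ∈ N
      · exact Or.inl hd
      · rcases List.mem_cons.mp ha with rfl | haq
        · exact absurd (List.mem_filter.mpr ⟨hadj, hp⟩) hd
        · exact Or.inr ⟨a, List.mem_append_left _ haq, .base hadj ((hGm d).mpr ⟨hp, hd⟩)⟩
    | @step d e h1 hadj hp ih =>
      by_cases he : e ∈ N
      · exact Or.inl he
      · have hPe : pvGood gb L number (pvMarkAll v N) e = true := (hGm e).mpr ⟨hp, he⟩
        rcases ih with hdN | ⟨b, hb, hrb⟩
        · exact Or.inr ⟨d, List.mem_append_right _ hdN, .base hadj hPe⟩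
        · exact Or.inr ⟨b, hb, .step hrb hadj hPe⟩

-- == A's loop computes the reachable set ==

theorem pvLoopA_mem (gb : List (List Int)) (L number : Int) :
    ∀ (fuel : Nat) (v : List (List Bool)) (q s : List (Int × Int)),
      5 * pvFalse v + q.length ≤ fuel → ∀ n,
      (n ∈ pvLoopA gb L number v q s ↔
        n ∈ s ∨ ∃ a ∈ q, pvReach (fun m => pvGood gb L number v m = true) a n) := by
  intro fuel
  induction fuel with
  | zero =>
    intro v q s hf n
    cases q with
    | nil => simp [pvLoopA]
    | cons c q => simp only [List.length_cons] at hf; omega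
  | succ fuel ih =>
    intro v q s hf n
    cases q with
    | nil => simp [pvLoopA]
    | cons c q =>
      rw [pvLoopA]
      have hnb : List.map (fun d => (d.1 + c.1, d.2 + c.2)) pvDirs = pvNbrs c := rfl
      have hstep := pvStepDirs_spec gb L number c pvDirs v q s (pvNbrs_nodup c)
      rw [hnb] at hstep
      have hms := pvStepDirs_measure gb L number pvDirs c v q s
      rw [hstep] at hms
      simp only [List.length_append, List.length_cons] at hms hf
      simp only [hstep]
      rw [ih _ _ _ (by simp only [List.length_append]; omega) n]
      rw [List.mem_append]
      have hk := pvKeyA gb L number v q c n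
      constructor
      · rintro ((hA | hB) | hC)
        · exact Or.inl hA
        · exact Or.inr (hk.mp (Or.inl hB))
        · exact Or.inr (hk.mp (Or.inr hC))
      · rintro (hA | hD)
        · exact Or.inl (Or.inl hA)
        · rcases hk.mpr hD with hB | hC
          · exact Or.inl (Or.inr hB)
          · exact Or.inr hC

theorem pvLoopA_nodup (gb : List (List Int)) (L number : Int) :
    ∀ (fuel : Nat) (v : List (List Bool)) (q s : List (Int × Int)),
      5 * pvFalse v + q.length ≤ fuel →
      (∀ m ∈ s, pvGood gb L number v m = false) → s.Nodup → (pvLoopA gb L number v q s).Nodup := by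
  intro fuel
  induction fuel with
  | zero =>
    intro v q s hf hs hnd
    cases q with
    | nil => simpa [pvLoopA] using hnd
    | cons c q => simp only [List.length_cons] at hf; omega
  | succ fuel ih =>
    intro v q s hf hs hnd
    cases q with
    | nil => simpa [pvLoopA] using hnd
    | cons c q =>
      rw [pvLoopA]
      have hnb : List.map (fun d => (d.1 + c.1, d.2 + c.2)) pvDirs = pvNbrs c := rfl
      have hstep := pvStepDirs_spec gb L number c pvDirs v q s (pvNbrs_nodup c)
      rw [hnb] at hstep
      have hms := pvStepDirs_measure gb L number pvDirs c v q s
      rw [hstep] at hms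
      simp only [List.length_append, List.length_cons] at hms hf
      simp only [hstep]
      set N := (pvNbrs c).filter (pvGood gb L number v) with hNdef
      have hNgood : ∀ p ∈ N, pvGood gb L number v p = true := fun p hp => List.of_mem_filter hp
      apply ih _ _ _ (by simp only [List.length_append]; omega)
      · intro m hm
        have hiff := pvGood_markAll gb L number v N hNgood m
        cases hgm : pvGood gb L number (pvMarkAll v N) m with
        | false => rfl
        | true =>
          rcases List.mem_append.mp hm with hms' | hmN
          · exact absurd (hiff.mp hgm).1 (by simp [hs m hms'])
          · exact absurd hmN (hiff.mp hgm).2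
      · apply List.Nodup.append hnd (List.Nodup.filter _ (pvNbrs_nodup c))
        intro m hms' hmN
        exact absurd (hNgood m hmN) (by simp [hs m hms'])

-- == start-cell facts shared by both characterisations ==

theorem pvMarkStart_nonneg (v : List (List Bool)) (x y : Int) (hx : 0 ≤ x) (hy : 0 ≤ y) :
    pvMarkStart v x y = pvMark v (x, y) := by
  simp [pvMarkStart, pvMark, pvPyIdx, not_lt.mpr hx, not_lt.mpr hy]

theorem pvGoodStart (gb : List (List Int)) (L number : Int) (v : List (List Bool))
    (x y : Int) : pvGood gb L number (pvMarkStart v x y) (x, y) = false := by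
  by_cases hx : 0 ≤ x
  · by_cases hy : 0 ≤ y
    · rw [pvMarkStart_nonneg v x y hx hy]
      simp [pvGood, pvVAt_mark_self]
    · simp [pvGood, pvInb, hy]
  · simp [pvGood, pvInb, hx]

theorem pvFalse_markStart_lt (v : List (List Bool)) (n : Int × Int)
    (h0 : 0 ≤ n.1 ∧ 0 ≤ n.2) (h : pvVAt v n = false) :
    pvFalse (pvMarkStart v n.1 n.2) < pvFalse v := by
  rw [show pvMarkStart v n.1 n.2 = pvMark v n by
    rw [pvMarkStart_nonneg v n.1 n.2 h0.1 h0.2]]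
  exact pvMark_false_lt v n h

-- == the DFS recursion computes the reachable set, depth first ==

/-- the full specification of one `dfs` call at a given fuel, relative to
    `V1 := visited-after-marking-the-start-cell`. -/
def pvDfsSpec (gb : List (List Int)) (L number : Int) (fuel : Nat) : Prop :=
  ∀ (v : List (List Bool)) (s : List (Int × Int)) (c : Int × Int),
    pvFalse (pvMarkStart v c.1 c.2) < fuel →
    ∃ Δ, pvDfsF gb L number fuel v s c =
        (pvMarkAll (pvMarkStart v c.1 c.2) Δ, s ++ c :: Δ) ∧
      (∀ m ∈ Δ, pvGood gb L number (pvMarkStart v c.1 c.2) m = true ∧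
        pvReach (fun m' => pvGood gb L number (pvMarkStart v c.1 c.2) m' = true) c m) ∧
      (∀ d ∈ c :: Δ, ∀ m ∈ pvNbrs d,
        pvGood gb L number (pvMarkAll (pvMarkStart v c.1 c.2) Δ) m = false) ∧
      Δ.Nodup

theorem pvDfsDirs_main (gb : List (List Int)) (L number : Int) (fuel : Nat)
    (hIH : pvDfsSpec gb L number fuel) :
    ∀ (ds : List (Int × Int)) (V1 : List (List Bool)) (Δ0 s : List (Int × Int))
      (c : Int × Int),
      (∀ d ∈ ds, d ∈ pvDirs) →
      pvFalse V1 ≤ fuel →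
      (∀ m ∈ Δ0, pvGood gb L number V1 m = true) →
      ∃ Δ1, pvDfsDirsF gb L number fuel ds (pvMarkAll V1 Δ0) s c =
          (pvMarkAll V1 (Δ0 ++ Δ1), s ++ Δ1) ∧
        (∀ m ∈ Δ1, pvGood gb L number V1 m = true ∧ m ∉ Δ0 ∧
          pvReach (fun m' => pvGood gb L number V1 m' = true) c m) ∧
        (∀ m ∈ ds.map (fun d => (d.1 + c.1, d.2 + c.2)),
          pvGood gb L number (pvMarkAll V1 (Δ0 ++ Δ1)) m = false) ∧
        (∀ d ∈ Δ1, ∀ m ∈ pvNbrs d,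
          pvGood gb L number (pvMarkAll V1 (Δ0 ++ Δ1)) m = false) ∧
        Δ1.Nodup := by
  intro ds
  induction ds with
  | nil =>
    intro V1 Δ0 s c _ _ _
    exact ⟨[], by simp [pvDfsDirsF], by simp, by simp, by simp, by simp⟩
  | cons d ds ih =>
    intro V1 Δ0 s c hds hfuel hΔ0
    have hds' : ∀ d' ∈ ds, d' ∈ pvDirs := fun d' hd' => hds d' (List.mem_cons_of_mem d hd')
    have hdmem : d ∈ pvDirs := hds d List.mem_cons_self
    have hΔ0n : ∀ p ∈ Δ0, 0 ≤ p.1 ∧ 0 ≤ p.2 := fun p hp =>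
      ⟨(pvGood_nonneg (hΔ0 p hp)).1.1, (pvGood_nonneg (hΔ0 p hp)).2.1⟩
    set v0 := pvMarkAll V1 Δ0 with hv0
    set n : Int × Int := (d.1 + c.1, d.2 + c.2) with hn
    have hunf : pvDfsDirsF gb L number fuel (d :: ds) v0 s c =
        (if pvGood gb L number v0 n = true then
          pvDfsDirsF gb L number fuel ds (pvDfsF gb L number fuel v0 s n).1
            (pvDfsF gb L number fuel v0 s n).2 c
        else pvDfsDirsF gb L number fuel ds v0 s c) := by
      simp only [pvDfsDirsF, pvGood, hn]
    by_cases hg : pvGood gb L number v0 n = true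
    · rw [if_pos hg] at hunf
      have hgV1 : pvGood gb L number V1 n = true := pvGood_markAll_imp gb L number V1 Δ0 hΔ0n n hg
      have hnn : 0 ≤ n.1 ∧ 0 ≤ n.2 := ⟨(pvGood_nonneg hg).1.1, (pvGood_nonneg hg).2.1⟩
      have hvn : pvVAt v0 n = false := by
        have := hg
        simp only [pvGood, Bool.and_eq_true, Bool.not_eq_eq_eq_not, Bool.not_true] at this
        exact this.2
      have hnΔ0 : n ∉ Δ0 := pvGood_markAll_not_mem gb L number V1 Δ0 hΔ0n n hg
      have hfc : pvFalse (pvMarkStart v0 n.1 n.2) < fuel := by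
        have h1 := pvFalse_markStart_lt v0 n hnn hvn
        have h2 : pvFalse v0 ≤ pvFalse V1 := pvFalse_markAll_le Δ0 V1
        omega
      obtain ⟨Δn, heqn, hmemn, hblackn, hndn⟩ := hIH v0 s n hfc
      have hV1' : pvMarkStart v0 n.1 n.2 = pvMarkAll V1 (Δ0 ++ [n]) := by
        rw [pvMarkStart_nonneg v0 n.1 n.2 hnn.1 hnn.2, pvMarkAll_append]
        rfl
      have hX1 : ∀ p ∈ Δ0 ++ [n], 0 ≤ p.1 ∧ 0 ≤ p.2 := by
        intro p hp
        rcases List.mem_append.mp hp with hp0 | hp1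
        · exact hΔ0n p hp0
        · rw [List.mem_singleton] at hp1; subst hp1; exact hnn
      have htrans : ∀ m ∈ Δn, pvGood gb L number V1 m = true := fun m hm =>
        pvGood_markAll_imp gb L number V1 (Δ0 ++ [n]) hX1 m (by rw [← hV1']; exact (hmemn m hm).1)
      have hnotX1 : ∀ m ∈ Δn, m ∉ Δ0 ++ [n] := fun m hm =>
        pvGood_markAll_not_mem gb L number V1 (Δ0 ++ [n]) hX1 m (by rw [← hV1']; exact (hmemn m hm).1)
      have hgoodV1' : ∀ m, pvGood gb L number (pvMarkStart v0 n.1 n.2) m = true →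
          pvGood gb L number V1 m = true := by
        intro m hm
        exact pvGood_markAll_imp gb L number V1 (Δ0 ++ [n]) hX1 m (by rw [← hV1']; exact hm)
      have hnnbrs : n ∈ pvNbrs c := List.mem_map.mpr ⟨d, hdmem, rfl⟩
      have hreachn : pvReach (fun m' => pvGood gb L number V1 m' = true) c n := .base hnnbrs hgV1
      have h1 : (pvDfsF gb L number fuel v0 s n).1 = pvMarkAll V1 ((Δ0 ++ [n]) ++ Δn) := by
        rw [heqn]
        show pvMarkAll (pvMarkStart v0 n.1 n.2) Δn = _
        rw [hV1', ← pvMarkAll_append]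
      have h2 : (pvDfsF gb L number fuel v0 s n).2 = s ++ n :: Δn := by rw [heqn]
      obtain ⟨Δ2, heq2, hmem2, hds2, hbl2, hnd2⟩ :=
        ih V1 ((Δ0 ++ [n]) ++ Δn) (s ++ n :: Δn) c hds' hfuel
          (by
            intro m hm
            rcases List.mem_append.mp hm with hm1 | hm2
            · rcases List.mem_append.mp hm1 with hm0 | hmn
              · exact hΔ0 m hm0
              · rw [List.mem_singleton] at hmn; subst hmn; exact hgV1
            · exact htrans m hm2)
      have hlist : Δ0 ++ n :: (Δn ++ Δ2) = ((Δ0 ++ [n]) ++ Δn) ++ Δ2 := by simp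
      have hall : ∀ p ∈ Δ0 ++ n :: (Δn ++ Δ2), pvGood gb L number V1 p = true := by
        intro p hp
        rcases List.mem_append.mp hp with hp0 | hp1
        · exact hΔ0 p hp0
        · rcases List.mem_cons.mp hp1 with rfl | hp2
          · exact hgV1
          · rcases List.mem_append.mp hp2 with hpn | hp3
            · exact htrans p hpn
            · exact (hmem2 p hp3).1
      refine ⟨n :: (Δn ++ Δ2), ?_, ?_, ?_, ?_, ?_⟩
      · rw [hunf, h1, h2, heq2, hlist]
        simp
      · intro m hm
        rcases List.mem_cons.mp hm with rfl | hm'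
        · exact ⟨hgV1, hnΔ0, hreachn⟩
        · rcases List.mem_append.mp hm' with hmn | hm2
          · refine ⟨htrans m hmn, fun hc => hnotX1 m hmn (List.mem_append_left _ hc), ?_⟩
            exact pvReach_trans hreachn (pvReach_mono hgoodV1' (hmemn m hmn).2)
          · obtain ⟨hg2, hn2, hr2⟩ := hmem2 m hm2
            exact ⟨hg2, fun hc => hn2 (List.mem_append_left _ (List.mem_append_left _ hc)), hr2⟩
      · intro m hm
        rcases List.mem_cons.mp hm with rfl | hm'
        · cases hgf : pvGood gb L number (pvMarkAll V1 (Δ0 ++ n :: (Δn ++ Δ2))) n with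
          | false => rfl
          | true =>
            exact absurd ((pvGood_markAll gb L number V1 _ hall n).mp hgf).2
              (by simp)
        · rw [hlist]
          exact hds2 m hm'
      · intro d' hd' m hmn'
        rw [hlist]
        rcases List.mem_cons.mp hd' with rfl | hd''
        · -- d' = n : from the child's blackness, persisted through Δ2's marks
          have hb := hblackn n List.mem_cons_self m hmn'
          rw [hV1', ← pvMarkAll_append] at hb
          rw [pvMarkAll_append]
          cases hgf : pvGood gb L number
              (pvMarkAll (pvMarkAll V1 ((Δ0 ++ [n]) ++ Δn)) Δ2) m with
          | false => rfl
          | true =>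
            have hΔ2n : ∀ p ∈ Δ2, 0 ≤ p.1 ∧ 0 ≤ p.2 := fun p hp =>
              ⟨(pvGood_nonneg (hmem2 p hp).1).1.1, (pvGood_nonneg (hmem2 p hp).1).2.1⟩
            have := pvGood_markAll_imp gb L number _ Δ2 hΔ2n m hgf
            rw [hb] at this
            cases this
        · rcases List.mem_append.mp hd'' with hdn | hd2
          · have hb := hblackn d' (List.mem_cons_of_mem _ hdn) m hmn'
            rw [hV1', ← pvMarkAll_append] at hb
            rw [pvMarkAll_append]
            cases hgf : pvGood gb L number
                (pvMarkAll (pvMarkAll V1 ((Δ0 ++ [n]) ++ Δn)) Δ2) m with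
            | false => rfl
            | true =>
              have hΔ2n : ∀ p ∈ Δ2, 0 ≤ p.1 ∧ 0 ≤ p.2 := fun p hp =>
                ⟨(pvGood_nonneg (hmem2 p hp).1).1.1, (pvGood_nonneg (hmem2 p hp).1).2.1⟩
              have := pvGood_markAll_imp gb L number _ Δ2 hΔ2n m hgf
              rw [hb] at this
              cases this
          · exact hbl2 d' hd2 m hmn'
      · refine List.nodup_cons.mpr ⟨?_, List.Nodup.append hndn hnd2 ?_⟩
        · intro hc
          rcases List.mem_append.mp hc with hcn | hc2
          · have := (hmemn n hcn).1
            have hgs : pvGood gb L number (pvMarkStart v0 n.1 n.2) (n.1, n.2) = false :=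
              pvGoodStart gb L number v0 n.1 n.2
            rw [show ((n.1 : Int), (n.2 : Int)) = n from rfl] at hgs
            rw [hgs] at this
            cases this
          · exact (hmem2 n hc2).2.1
              (List.mem_append_left _ (List.mem_append_right _ (List.mem_singleton.mpr rfl)))
        · intro m hma hm2
          exact (hmem2 m hm2).2.1 (List.mem_append_right _ hma)
    · rw [if_neg hg] at hunf
      obtain ⟨Δ2, heq2, hmem2, hds2, hbl2, hnd2⟩ := ih V1 Δ0 s c hds' hfuel hΔ0
      refine ⟨Δ2, by rw [hunf]; exact heq2, hmem2, ?_, hbl2, hnd2⟩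
      intro m hm
      rcases List.mem_cons.mp hm with rfl | hm'
      · cases hgf : pvGood gb L number (pvMarkAll V1 (Δ0 ++ Δ2)) n with
        | false => rfl
        | true =>
          have hΔ2n : ∀ p ∈ Δ2, 0 ≤ p.1 ∧ 0 ≤ p.2 := fun p hp =>
            ⟨(pvGood_nonneg (hmem2 p hp).1).1.1, (pvGood_nonneg (hmem2 p hp).1).2.1⟩
          rw [pvMarkAll_append] at hgf
          have := pvGood_markAll_imp gb L number v0 Δ2 hΔ2n n hgf
          exact absurd this hg
      · exact hds2 m hm'

theorem pvDfs_main (gb : List (List Int)) (L number : Int) :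
    ∀ fuel : Nat, pvDfsSpec gb L number fuel := by
  intro fuel
  induction fuel with
  | zero => intro v s c h; omega
  | succ fuel ih =>
    intro v s c hfuel
    obtain ⟨Δ1, heq, hmem, hds, hbl, hnd⟩ :=
      pvDfsDirs_main gb L number fuel ih pvDirs (pvMarkStart v c.1 c.2) [] (s ++ [c]) c
        (fun d hd => hd) (Nat.lt_succ_iff.mp hfuel) (by simp)
    refine ⟨Δ1, ?_, fun m hm => ⟨(hmem m hm).1, (hmem m hm).2.2⟩, ?_, hnd⟩
    · have h0 : pvDfsF gb L number (fuel + 1) v s c =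
          pvDfsDirsF gb L number fuel pvDirs (pvMarkStart v c.1 c.2) (s ++ [c]) c := by
        simp only [pvDfsF]
      rw [h0]
      have heq' : pvDfsDirsF gb L number fuel pvDirs (pvMarkStart v c.1 c.2) (s ++ [c]) c =
          (pvMarkAll (pvMarkStart v c.1 c.2) ([] ++ Δ1), (s ++ [c]) ++ Δ1) := heq
      rw [heq']
      simp
    · intro d hd m hmn
      rcases List.mem_cons.mp hd with rfl | hd'
      · have := hds m (show m ∈ pvDirs.map (fun d' => (d'.1 + d.1, d'.2 + d.2)) from hmn)
        simpa using this
      · have := hbl d hd' m hmn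
        simpa using this

-- == Python's sorted (lexicographic tuple order) only depends on the multiset ==

def pvLt2 (a b : Int × Int) : Bool :=
  decide (a.1 < b.1) || (!decide (b.1 < a.1) && decide (a.2 < b.2))

def pvLe2 (a b : Int × Int) : Prop := pvLt2 b a = false

theorem pvInsertBy_pairwise (x : Int × Int) :
    ∀ (l : List (Int × Int)), l.Pairwise pvLe2 →
      (PySem.List.insertBy pvLt2 x l).Pairwise pvLe2 := by
  intro l
  induction l with
  | nil => intro _; simp [PySem.List.insertBy]
  | cons y ys ih =>
    intro hp
    obtain ⟨hy, hys⟩ := List.pairwise_cons.mp hp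
    by_cases hb : pvLt2 x y = true
    · rw [show PySem.List.insertBy pvLt2 x (y :: ys) = x :: y :: ys by
        simp [PySem.List.insertBy, hb]]
      refine List.pairwise_cons.mpr ⟨?_, hp⟩
      intro z hz
      rcases List.mem_cons.mp hz with rfl | hz'
      · simp only [pvLe2, pvLt2, Bool.or_eq_true, Bool.and_eq_true, decide_eq_true_eq,
          Bool.not_eq_eq_eq_not, Bool.not_true, decide_eq_false_iff_not, not_lt] at hb ⊢
        simp only [Bool.or_eq_false_iff, Bool.and_eq_false_iff, decide_eq_false_iff_not,
          Bool.not_eq_eq_eq_not, Bool.not_false, decide_eq_true_eq, not_lt]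
        omega
      · have hyz := hy z hz'
        simp only [pvLe2, pvLt2, Bool.or_eq_true, Bool.and_eq_true, decide_eq_true_eq,
          Bool.not_eq_eq_eq_not, Bool.not_true, decide_eq_false_iff_not, not_lt,
          Bool.or_eq_false_iff, Bool.and_eq_false_iff, Bool.not_eq_eq_eq_not, Bool.not_false] at hb hyz ⊢
        omega
    · rw [show PySem.List.insertBy pvLt2 x (y :: ys) = y :: PySem.List.insertBy pvLt2 x ys by
        simp [PySem.List.insertBy, hb]]
      refine List.pairwise_cons.mpr ⟨?_, ih hys⟩
      intro z hz
      rcases (PySem.List.mem_insertBy pvLt2 x z ys).mp hz with rfl | hz'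
      · simpa [pvLe2] using (Bool.not_eq_true _).mp hb
      · exact hy z hz'

theorem pvSorted2_pairwise (l : List (Int × Int)) :
    (PySem.List.sorted2 l Prod.fst Prod.snd).Pairwise pvLe2 := by
  have key : ∀ (l' acc : List (Int × Int)), acc.Pairwise pvLe2 →
      (l'.foldl (fun acc x => PySem.List.insertBy pvLt2 x acc) acc).Pairwise pvLe2 := by
    intro l'
    induction l' with
    | nil => intro acc h; simpa using h
    | cons x xs ih =>
      intro acc h
      exact ih (PySem.List.insertBy pvLt2 x acc) (pvInsertBy_pairwise x acc h)
  have hrepr : PySem.List.sorted2 l Prod.fst Prod.snd =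
      l.foldl (fun acc x => PySem.List.insertBy pvLt2 x acc) [] := rfl
  rw [hrepr]
  exact key l [] (by simp)

theorem pvSorted2_eq_of_perm (l l' : List (Int × Int)) (h : l.Perm l') :
    PySem.List.sorted2 l Prod.fst Prod.snd = PySem.List.sorted2 l' Prod.fst Prod.snd := by
  apply List.eq_of_perm_of_sorted (le := pvLe2)
  · intro a b _ _ h1 h2
    simp only [pvLe2, pvLt2, Bool.or_eq_false_iff, Bool.and_eq_false_iff,
      decide_eq_false_iff_not, Bool.not_eq_eq_eq_not, Bool.not_false, decide_eq_true_eq, not_lt] at h1 h2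
    apply Prod.ext_iff.mpr
    constructor <;> omega
  · exact pvSorted2_pairwise l
  · exact pvSorted2_pairwise l'
  · exact ((PySem.List.sorted2_perm l _ _ _).trans h).trans (PySem.List.sorted2_perm l' _ _ _).symm

-- ===== VERDICT (by name: the statement is the Claim_ definition above) =====
theorem bfs_spec : Claim_equal_bfs := by
  unfold Claim_equal_bfs
  intro x y gb visited puzzle number hdom hpre
  unfold Spec_bfs
  simp only [bfs, bfs_alt]
  apply pvSorted2_eq_of_perm
  -- A's side: membership characterisation
  have hAmem := pvLoopA_mem gb (gb.length : Int) number
    (5 * pvFalse (pvMarkStart visited x y) + 1) (pvMarkStart visited x y) [(x, y)] [(x, y)]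
    (by simp)
  have hAnd := pvLoopA_nodup gb (gb.length : Int) number
    (5 * pvFalse (pvMarkStart visited x y) + 1) (pvMarkStart visited x y) [(x, y)] [(x, y)]
    (by simp)
    (by intro m hm; rw [List.mem_singleton] at hm; subst hm
        exact pvGoodStart gb (gb.length : Int) number visited x y)
    (by simp)
  -- B's side: the DFS specification at the chosen fuel
  obtain ⟨Δ, heq, hΔ, hblack, hnd⟩ :=
    pvDfs_main gb (gb.length : Int) number (pvFalse visited + 1) visited [] (x, y)
      (Nat.lt_succ_of_le (pvFalse_markStart_le visited x y))
  have hΔgood : ∀ m ∈ Δ, pvGood gb (gb.length : Int) number (pvMarkStart visited x y) m = true :=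
    fun m hm => (hΔ m hm).1
  have hcnot : (x, y) ∉ Δ := fun hc => by
    have := hΔgood _ hc
    rw [pvGoodStart gb (gb.length : Int) number visited x y] at this
    cases this
  -- B's result list
  have hres : (pvDfsF gb (gb.length : Int) number (pvFalse visited + 1) visited [] (x, y)).2
      = (x, y) :: Δ := by rw [heq]; rfl
  rw [hres]
  -- completeness of the DFS component
  have hcomplete : ∀ n, pvReach (fun m =>
      pvGood gb (gb.length : Int) number (pvMarkStart visited x y) m = true) (x, y) n → n ∈ Δ := by
    intro n hr
    induction hr with
    | @base m hadj hp =>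
      have hb := hblack (x, y) List.mem_cons_self m hadj
      have := (pvGood_markAll gb (gb.length : Int) number (pvMarkStart visited x y) Δ hΔgood m)
      by_contra hnm
      rw [this.mpr ⟨hp, hnm⟩] at hb
      cases hb
    | @step d e h1 hadj hp ih =>
      have hd : d ∈ (x, y) :: Δ := List.mem_cons_of_mem _ ih
      have hb := hblack d hd e hadj
      have := (pvGood_markAll gb (gb.length : Int) number (pvMarkStart visited x y) Δ hΔgood e)
      by_contra hnm
      rw [this.mpr ⟨hp, hnm⟩] at hb
      cases hb
  -- the two result lists are permutations (same members, both without duplicates)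
  apply (List.perm_ext_iff_of_nodup hAnd (List.nodup_cons.mpr ⟨hcnot, hnd⟩)).mpr
  intro n
  rw [hAmem n]
  simp only [List.mem_singleton, List.mem_cons, List.not_mem_nil, or_false, exists_eq_left]
  constructor
  · rintro (rfl | hr)
    · exact Or.inl rfl
    · exact Or.inr (hcomplete n hr)
  · rintro (rfl | hm)
    · exact Or.inl rfl
    · exact Or.inr (hΔ n hm).2
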